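-- pv_equiv track=rewrite | github.com/zzy0459/ai_proj | TestSolutions/PSO_evaluation.py | compute_makespan
-- ===== SOURCE A (Python) =====
-- def compute_makespan(perm, processing_times):
--     """（与NEH代码完全一致）"""
--     nb_machines = len(processing_times[0])
--     timeline = [0] * nb_machines
--     for job in perm:
--         timeline[0] += processing_times[job][0]
--         for m in range(1, nb_machines):
--             timeline[m] = max(timeline[m], timeline[m - 1]) + processing_times[job][m]
--     return timeline[-1]
-- ===== SOURCE B (Python) =====
-- def compute_makespan(perm, processing_times):
--     # Machine-major recomputation: one completion column per machine instead of a job-major timeline.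
--     nb_machines = len(processing_times[0])
--     if not perm:
--         return 0
--     rows = [processing_times[j] for j in perm]
--     prev = []
--     running = 0
--     for row in rows:                    # machine 0: prefix sums of the first column
--         running += row[0]
--         prev.append(running)
--     for m in range(1, nb_machines):     # machine m: sweep job positions
--         running = 0
--         cur = []
--         for i, row in enumerate(rows):
--             running = max(prev[i], running) + row[m]
--             cur.append(running)
--         prev = cur
--     return prev[-1]
-- ===== Notes on version B (the rewrite author's own statement) =====
-- stated objective: alternative
-- what changed: B transposes the traversal to machine-major order: it materialises the selected rows, builds machine 0's completion column as a running prefix sum, then sweeps one full completion column per subsequent machine, instead of A's job-major updates of a single mutable timeline.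
import Mathlib
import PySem

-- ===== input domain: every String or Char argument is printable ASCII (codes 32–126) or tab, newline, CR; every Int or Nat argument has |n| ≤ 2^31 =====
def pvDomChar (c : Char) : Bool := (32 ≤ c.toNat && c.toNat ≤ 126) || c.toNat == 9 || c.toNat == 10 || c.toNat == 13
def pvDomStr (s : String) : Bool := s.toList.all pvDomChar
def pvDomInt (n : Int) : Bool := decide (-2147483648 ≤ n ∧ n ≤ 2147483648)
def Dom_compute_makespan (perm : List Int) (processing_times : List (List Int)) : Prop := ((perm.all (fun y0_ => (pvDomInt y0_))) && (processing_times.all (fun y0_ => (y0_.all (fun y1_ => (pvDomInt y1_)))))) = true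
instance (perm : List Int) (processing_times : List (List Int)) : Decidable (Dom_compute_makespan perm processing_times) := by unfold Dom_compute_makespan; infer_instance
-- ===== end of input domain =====

-- B recomputes the flowshop makespan machine-major (one completion column per machine,
-- machine 0 as a prefix sum) instead of A's job-major sweep of a single timeline;
-- alternative decomposition, same cost.

-- ===== PORT A =====
-- inner loop 'for m in range(1, nb): timeline[m] = max(timeline[m], timeline[m-1]) + row[m]'
-- as a left-to-right scan over the remaining timeline and the remaining row
def jobSweep : Int → List Int → List Int → List Int
  | _, [], _ => []
  | _, _ :: _, [] => []
  | c, t :: ts, r :: rs => (max t c + r) :: jobSweep (max t c + r) ts rs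

-- one iteration of 'for job in perm': timeline[0] += row[0], then the inner sweep
def jobStep : List Int → List Int → List Int
  | [], _ => []
  | _ :: _, [] => []
  | t :: ts, r :: rs => (t + r) :: jobSweep (t + r) ts rs

def compute_makespan (perm : List Int) (processing_times : List (List Int)) : Int :=
  let nb := (processing_times.headD []).length
  let timeline := perm.foldl (fun tl job =>
    match PySem.List.pyGet? processing_times job with
    | some row => jobStep tl row
    | none => tl) (List.replicate nb (0 : Int))
  (PySem.List.pyGet? timeline (-1)).getD 0   -- timeline[-1]

-- ===== PORT B =====
-- machine 0: running prefix sums of the first column of the selected rows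
def prefixCol : Int → List (List Int) → List Int
  | _, [] => []
  | c, r :: rs => (c + r.headD 0) :: prefixCol (c + r.headD 0) rs

-- machine m: sweep job positions; prev = previous machine's column, c = running
def sweepCol (m : Int) : Int → List Int → List (List Int) → List Int
  | _, [], _ => []
  | _, _ :: _, [] => []
  | c, p :: ps, r :: rs =>
      (max p c + (PySem.List.pyGet? r m).getD 0) ::
        sweepCol m (max p c + (PySem.List.pyGet? r m).getD 0) ps rs

def compute_makespan_alt (perm : List Int) (processing_times : List (List Int)) : Int :=
  let nb := (processing_times.headD []).length
  if perm.isEmpty then 0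
  else
    let rows := perm.map (fun j => (PySem.List.pyGet? processing_times j).getD [])
    let last := (PySem.List.pyRange 1 (nb : Int) 1).foldl
      (fun prev m => sweepCol m 0 prev rows) (prefixCol 0 rows)
    (PySem.List.pyGet? last (-1)).getD 0   -- prev[-1]

-- ===== PRECONDITION & SPEC =====
-- Pre_ excludes exactly the inputs on which A raises IndexError: empty processing_times,
-- an empty first row (nb_machines = 0), a job index out of range, or an accessed row
-- shorter than nb_machines.
def Pre_compute_makespan (perm : List Int) (processing_times : List (List Int)) : Prop :=
  processing_times ≠ [] ∧ 0 < (processing_times.headD []).length ∧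
  ∀ j ∈ perm, PySem.Raise.InRange processing_times.length j ∧
    (processing_times.headD []).length ≤ ((PySem.List.pyGet? processing_times j).getD []).length

instance (perm : List Int) (processing_times : List (List Int)) : Decidable (Pre_compute_makespan perm processing_times) := by unfold Pre_compute_makespan; infer_instance

def pvWitness_compute_makespan : List Int × List (List Int) := ([1, 0], [[3, 2], [1, 4]])

def Spec_compute_makespan (perm : List Int) (processing_times : List (List Int)) (out : Int) : Prop := out = compute_makespan_alt perm processing_times
instance (perm : List Int) (processing_times : List (List Int)) (out : Int) : Decidable (Spec_compute_makespan perm processing_times out) := by unfold Spec_compute_makespan; infer_instance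

-- ===== CLAIM (what is proved, stated in full; the proofs are below) =====
def Claim_equal_compute_makespan : Prop := ∀ (perm : List Int) (processing_times : List (List Int)), Dom_compute_makespan perm processing_times → Pre_compute_makespan perm processing_times → Spec_compute_makespan perm processing_times (compute_makespan perm processing_times)

-- ===== LEMMAS AND PROOFS =====

-- the grid recurrence for one new job appended after a prefix whose machine-wise
-- completion lasts are `old`: nxt old r m = completion of the new job on machine m
def nxt (old : Nat → Int) (r : List Int) : Nat → Int
  | 0 => old 0 + r.getD 0 0
  | m + 1 => max (old (m + 1)) (nxt old r m) + r.getD (m + 1) 0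

-- the column of machine m in B's machine-major computation
def colAt (rows : List (List Int)) : Nat → List Int
  | 0 => prefixCol 0 rows
  | m + 1 => sweepCol ((m : Int) + 1) 0 (colAt rows m) rows

theorem length_prefixCol (rs : List (List Int)) : ∀ c, (prefixCol c rs).length = rs.length := by
  induction rs with
  | nil => intro c; rfl
  | cons r rs ih => intro c; simp [prefixCol, ih]

theorem length_sweepCol (m : Int) (ps : List Int) :
    ∀ (rs : List (List Int)) (c : Int), (sweepCol m c ps rs).length = min ps.length rs.length := by
  induction ps with
  | nil => intro rs c; simp [sweepCol]
  | cons p ps ih =>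
    intro rs c
    cases rs with
    | nil => simp [sweepCol]
    | cons r rs => simp [sweepCol, ih]

theorem length_colAt (rows : List (List Int)) : ∀ m, (colAt rows m).length = rows.length := by
  intro m
  induction m with
  | zero => simp [colAt, length_prefixCol]
  | succ m ih => simp [colAt, length_sweepCol, ih]

theorem colAt_nil : ∀ m, colAt [] m = [] := by
  intro m
  induction m with
  | zero => rfl
  | succ m ih => simp [colAt, ih, sweepCol]

theorem prefixCol_append_singleton (rs : List (List Int)) :
    ∀ (c : Int) (r : List Int),
      prefixCol c (rs ++ [r]) = prefixCol c rs ++ [(prefixCol c rs).getLastD c + r.headD 0] := by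
  induction rs with
  | nil => intro c r; rfl
  | cons x rs ih =>
    intro c r
    simp only [List.cons_append, prefixCol]
    rw [ih, List.getLastD_cons]

theorem sweepCol_append_singleton (m : Int) (ps : List Int) :
    ∀ (rs : List (List Int)) (c p : Int) (r : List Int), ps.length = rs.length →
      sweepCol m c (ps ++ [p]) (rs ++ [r]) =
        sweepCol m c ps rs ++
          [max p ((sweepCol m c ps rs).getLastD c) + (PySem.List.pyGet? r m).getD 0] := by
  induction ps with
  | nil =>
    intro rs c p r h
    cases rs with
    | nil => rfl
    | cons _ _ => simp at h
  | cons a ps ih =>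
    intro rs c p r h
    cases rs with
    | nil => simp at h
    | cons b rs =>
      simp at h
      simp only [List.cons_append, sweepCol]
      rw [ih rs _ p r h, List.getLastD_cons]

theorem jobSweep_scan (old : Nat → Int) (r : List Int) :
    ∀ (k s : Nat) (c : Int), c = nxt old r s → s + 1 + k ≤ r.length →
      jobSweep c ((List.range' (s + 1) k).map old) (r.drop (s + 1)) =
        (List.range' (s + 1) k).map (nxt old r) := by
  intro k
  induction k with
  | zero => intro s c _ _; rfl
  | succ k ih =>
    intro s c hc hlen
    have hs : s + 1 < r.length := by omega
    rw [List.range'_succ, List.drop_eq_getElem_cons hs]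
    have hv : max (old (s + 1)) c + r[s + 1] = nxt old r (s + 1) := by
      rw [hc, nxt, List.getD_eq_getElem r 0 hs]
    simp only [List.map_cons, jobSweep, hv]
    have := ih (s + 1) (nxt old r (s + 1)) rfl (by omega)
    simpa using this

theorem jobStep_scan (nb : Nat) (old : Nat → Int) (r : List Int)
    (hnb : 0 < nb) (hlen : nb ≤ r.length) :
    jobStep ((List.range nb).map old) r = (List.range nb).map (nxt old r) := by
  obtain ⟨n, rfl⟩ : ∃ n, nb = n + 1 := ⟨nb - 1, by omega⟩
  cases r with
  | nil => simp at hlen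
  | cons r0 rt =>
    have h0 : old 0 + r0 = nxt old (r0 :: rt) 0 := by simp [nxt]
    rw [List.range_eq_range', List.range'_succ]
    simp only [List.map_cons, jobStep, h0]
    have hs := jobSweep_scan old (r0 :: rt) n 0 (nxt old (r0 :: rt) 0) rfl
      (by simp only [List.length_cons] at hlen ⊢; omega)
    simp only [List.drop_succ_cons, List.drop_zero] at hs
    rw [hs]

theorem colAt_append_singleton (rows : List (List Int)) (r : List Int) :
    ∀ m, colAt (rows ++ [r]) m =
      colAt rows m ++ [nxt (fun i => (colAt rows i).getLastD 0) r m] := by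
  intro m
  induction m with
  | zero =>
    show prefixCol 0 (rows ++ [r]) = _
    rw [prefixCol_append_singleton]
    have hhd : r.head?.getD 0 = r[0]?.getD 0 := by cases r <;> rfl
    simp [colAt, nxt, hhd]
  | succ m ih =>
    show sweepCol ((m : Int) + 1) 0 (colAt (rows ++ [r]) m) (rows ++ [r]) = _
    rw [ih, sweepCol_append_singleton _ _ _ _ _ _ (by rw [length_colAt])]
    have hg : (PySem.List.pyGet? r ((m : Int) + 1)).getD 0 = r.getD (m + 1) 0 := by
      have : ((m : Int) + 1) = ((m + 1 : Nat) : Int) := by push_cast; ring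
      rw [this, PySem.List.pyGet?_natCast]
      rfl
    simp [colAt, nxt, hg, max_comm]

theorem foldl_jobStep_eq (nb : Nat) (hnb : 0 < nb) (rows : List (List Int))
    (hrows : ∀ r ∈ rows, nb ≤ r.length) :
    rows.foldl jobStep (List.replicate nb (0 : Int)) =
      (List.range nb).map (fun m => (colAt rows m).getLastD 0) := by
  induction rows using List.reverseRecOn with
  | nil =>
    simp [colAt_nil]
  | append_singleton rows r ih =>
    have hr : nb ≤ r.length := hrows r (by simp)
    have hrows' : ∀ r' ∈ rows, nb ≤ r'.length := fun r' h => hrows r' (by simp [h])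
    rw [List.foldl_append, ih hrows', List.foldl_cons, List.foldl_nil,
      jobStep_scan nb _ r hnb hr]
    apply List.map_congr_left
    intro m hm
    rw [colAt_append_singleton]
    simp

theorem machineFold_eq (rows : List (List Int)) :
    ∀ k : Nat, (PySem.List.pyRange 1 ((k : Int) + 1) 1).foldl
        (fun prev m => sweepCol m 0 prev rows) (prefixCol 0 rows) = colAt rows k := by
  intro k
  induction k with
  | zero => simp [PySem.List.pyRange_one_eq_nil, colAt]
  | succ k ih =>
    have h : ((k + 1 : Nat) : Int) + 1 = ((k : Int) + 1) + 1 := by push_cast; ring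
    rw [h, PySem.List.pyRange_one_succ_right (by omega), List.foldl_append, ih]
    simp [colAt]

theorem getLastD_map_range (nb : Nat) (hnb : 0 < nb) (f : Nat → Int) :
    ((List.range nb).map f).getLastD 0 = f (nb - 1) := by
  obtain ⟨n, rfl⟩ : ∃ n, nb = n + 1 := ⟨nb - 1, by omega⟩
  rw [List.range_succ]
  simp

-- ===== VERDICT (by name: the statement is the Claim_ definition above) =====
theorem compute_makespan_spec : Claim_equal_compute_makespan := by
  intro perm pts _ hpre
  obtain ⟨hne, hnb, hjobs⟩ := hpre
  unfold Spec_compute_makespan compute_makespan compute_makespan_alt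
  dsimp only
  set nb := (pts.headD []).length with hnbdef
  set rows := perm.map (fun j => (PySem.List.pyGet? pts j).getD []) with hrowsdef
  -- A's fold over perm with lookup = fold of jobStep over rows
  have hfold : perm.foldl (fun tl job =>
      match PySem.List.pyGet? pts job with
      | some row => jobStep tl row
      | none => tl) (List.replicate nb (0 : Int)) =
      rows.foldl jobStep (List.replicate nb (0 : Int)) := by
    rw [hrowsdef, List.foldl_map]
    apply PySem.List.foldl_congr_mem
    intro acc j hj
    have hin := (hjobs j hj).1
    cases hg : PySem.List.pyGet? pts j with
    | none =>
      rw [PySem.List.pyGet?_eq_none_iff] at hg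
      exact absurd hin hg
    | some row => rfl
  have hrlen : ∀ r ∈ rows, nb ≤ r.length := by
    intro r hr
    rw [hrowsdef] at hr
    obtain ⟨j, hj, rfl⟩ := List.mem_map.mp hr
    exact (hjobs j hj).2
  by_cases hperm : perm = []
  · subst hperm
    simp only [List.isEmpty_nil, if_true, List.foldl_nil]
    rw [PySem.List.pyGet?_neg_one]
    have : (List.replicate nb (0 : Int)).getLast? = some 0 := by
      obtain ⟨n, hn⟩ : ∃ n, nb = n + 1 := ⟨nb - 1, by omega⟩
      rw [hn, List.replicate_succ', List.getLast?_append_cons]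
      rfl
    simp [this]
  · have hrows_ne : rows ≠ [] := by
      rw [hrowsdef]; simpa using hperm
    rw [hfold, foldl_jobStep_eq nb hnb rows hrlen]
    simp only [List.isEmpty_eq_false_iff.mpr hperm]
    obtain ⟨n, hn⟩ : ∃ n, nb = n + 1 := ⟨nb - 1, by omega⟩
    have hfoldB : (PySem.List.pyRange 1 (nb : Int) 1).foldl
        (fun prev m => sweepCol m 0 prev rows) (prefixCol 0 rows) = colAt rows n := by
      have : (nb : Int) = ((n : Int) + 1) := by rw [hn]; push_cast; ring
      rw [this, machineFold_eq]
    rw [hfoldB, PySem.List.pyGet?_neg_one, PySem.List.pyGet?_neg_one]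
    have hgl : ∀ (l : List Int), l.getLast?.getD 0 = l.getLastD 0 := by
      intro l; cases l <;> simp
    rw [hgl, hgl, getLastD_map_range nb hnb]
    have hn' : nb - 1 = n := by omega
    rw [hn']
    rfl
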